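-- pv_equiv track=rewrite | github.com/711mt/SPA | gradivo do binarnog stabla/II nedelja - rekurzija/rekurzija.py | neg_parni
-- ===== SOURCE A (Python) =====
-- def neg_parni(niz):
--     if len(niz)==0:
--         return 0
--     else:
--         prvi_element=niz[0]
--         if prvi_element<0 and prvi_element%2==0:
--             return 1 + neg_parni(niz[1:])
--         else:
--             return neg_parni(niz[1:])
-- ===== SOURCE B (Python) =====
-- def neg_parni(niz):
--     return sum(1 for x in niz if x < 0 and x % 2 == 0)
-- ===== Notes on version B (the rewrite author's own statement) =====
-- stated objective: idiomatic
-- what changed: Replaced head/tail recursion with slicing by a single flat generator-sum over the list.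
import Mathlib
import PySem

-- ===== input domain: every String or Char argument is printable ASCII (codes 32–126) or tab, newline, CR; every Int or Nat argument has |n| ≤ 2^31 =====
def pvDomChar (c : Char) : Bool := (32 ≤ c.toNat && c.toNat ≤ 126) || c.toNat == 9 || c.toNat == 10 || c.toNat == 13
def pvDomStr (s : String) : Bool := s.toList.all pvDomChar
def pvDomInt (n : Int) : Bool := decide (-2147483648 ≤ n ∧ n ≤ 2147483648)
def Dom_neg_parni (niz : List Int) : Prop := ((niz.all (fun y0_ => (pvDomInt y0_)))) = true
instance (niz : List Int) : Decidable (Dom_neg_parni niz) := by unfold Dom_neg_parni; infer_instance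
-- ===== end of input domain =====

-- B rewrites A's head/tail recursion as a single flat filtered sum over the list (idiomatic, O(n) vs A's O(n^2) slicing).

-- ===== PORT A =====
-- literal transliteration of A: recursion on head + slice niz[1:]
def neg_parni (niz : List Int) : Int :=
  if niz.length == 0 then 0
  else
    let prvi_element := niz.headI
    if prvi_element < 0 && PySem.Int.mod prvi_element 2 == 0 then
      1 + neg_parni (PySem.List.slice niz (some 1) none)
    else
      neg_parni (PySem.List.slice niz (some 1) none)
termination_by niz.length
decreasing_by
  all_goals
    rw [PySem.List.slice_from_one]
    cases niz with
    | nil => simp_all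
    | cons a t => simp

-- ===== PORT B =====
-- sum(1 for x in niz if x < 0 and x % 2 == 0)
def neg_parni_alt (niz : List Int) : Int :=
  niz.foldl (fun acc x => if x < 0 && PySem.Int.mod x 2 == 0 then acc + 1 else acc) 0

-- ===== PRECONDITION & SPEC =====
def Spec_neg_parni (niz : List Int) (out : Int) : Prop := out = neg_parni_alt niz
instance (niz : List Int) (out : Int) : Decidable (Spec_neg_parni niz out) := by unfold Spec_neg_parni; infer_instance

-- ===== CLAIM (what is proved, stated in full; the proofs are below) =====
def Claim_equal_neg_parni : Prop := ∀ (niz : List Int), Dom_neg_parni niz → Spec_neg_parni niz (neg_parni niz)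

-- ===== LEMMAS AND PROOFS =====

theorem alt_shift (niz : List Int) (c : Int) :
    niz.foldl (fun acc x => if x < 0 && PySem.Int.mod x 2 == 0 then acc + 1 else acc) c
      = c + neg_parni_alt niz := by
  induction niz generalizing c with
  | nil => simp [neg_parni_alt]
  | cons a t ih =>
    simp only [neg_parni_alt, List.foldl] at *
    split
    · rw [ih, ih ((0:Int)+1)]; omega
    · rw [ih]

theorem a_eq_b (niz : List Int) : neg_parni niz = neg_parni_alt niz := by
  induction niz with
  | nil => simp [neg_parni, neg_parni_alt]
  | cons a t ih =>
    rw [neg_parni]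
    simp only [PySem.List.slice_from_one, List.tail_cons, List.length_cons, List.headI]
    conv_rhs => rw [neg_parni_alt]
    simp only [List.foldl]
    rw [alt_shift]
    split
    · simp_all [neg_parni_alt]
    · split <;> simp_all [neg_parni_alt]

-- ===== VERDICT (by name: the statement is the Claim_ definition above) =====
theorem neg_parni_spec : Claim_equal_neg_parni := by
  intro niz _
  exact a_eq_b niz
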